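-- pv_equiv track=rewrite | github.com/nicholasesposito/aistuff | codeconvert_ai/input3.py | count_gates
-- ===== SOURCE A (Python) =====
-- def count_gates(nh, hgts):
--     hgtp = hgts[0] - 1
--     mh = 0
--     for i in range(nh):
--         if hgts[i] <= hgtp:
--             continue
--         mh += 1
--         hgtp = hgts[i]
--     return mh
-- ===== SOURCE B (Python) =====
-- def count_gates(nh, hgts):
--     run = []
--     for i in range(nh):
--         h = hgts[i]
--         run.append(h if not run or h > run[-1] else run[-1])
--     return len(set(run))
-- ===== Notes on version B (the rewrite author's own statement) =====
-- stated objective: alternative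
-- what changed: B builds the running-maximum table of the first nh heights and returns the number of distinct values in it, instead of A's compare-and-bump counter with a sentinel hgts[0]-1 start.
import Mathlib
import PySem

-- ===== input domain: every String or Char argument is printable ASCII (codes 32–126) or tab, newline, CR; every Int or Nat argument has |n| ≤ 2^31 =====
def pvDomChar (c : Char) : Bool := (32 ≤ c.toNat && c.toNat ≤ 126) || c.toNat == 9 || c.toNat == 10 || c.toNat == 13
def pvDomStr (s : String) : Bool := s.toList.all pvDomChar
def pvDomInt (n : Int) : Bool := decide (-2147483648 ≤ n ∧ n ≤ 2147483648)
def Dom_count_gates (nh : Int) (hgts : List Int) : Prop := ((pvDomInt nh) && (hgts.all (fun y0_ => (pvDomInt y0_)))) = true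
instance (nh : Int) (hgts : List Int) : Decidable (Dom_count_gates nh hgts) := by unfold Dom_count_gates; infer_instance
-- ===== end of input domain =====

-- B counts the distinct values of the running-maximum table instead of A's compare-and-bump counter; same cost, different decomposition.

-- ===== PORT A =====
def count_gates (nh : Int) (hgts : List Int) : Int :=
  let hgtp := PySem.List.pyGetD hgts 0 0 - 1
  let st := (PySem.List.pyRange 0 nh 1).foldl
    (fun (st : Int × Int) i =>
      if PySem.List.pyGetD hgts i 0 ≤ st.2 then st
      else (st.1 + 1, PySem.List.pyGetD hgts i 0))
    (0, hgtp)
  st.1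

-- ===== PORT B =====
def count_gates_alt (nh : Int) (hgts : List Int) : Int :=
  let run := (PySem.List.pyRange 0 nh 1).foldl
    (fun (run : List Int) i =>
      let h := PySem.List.pyGetD hgts i 0
      run ++ [if run.isEmpty || decide (h > PySem.List.pyGetD run (-1) 0) then h
              else PySem.List.pyGetD run (-1) 0])
    []
  PySem.Set.len (PySem.Set.ofList run)

-- ===== PRECONDITION & SPEC =====
-- Pre_ excludes exactly the inputs on which Python A raises IndexError: the empty list
-- (hgts[0]) and nh > len(hgts) (hgts[i] inside the loop).
def Pre_count_gates (nh : Int) (hgts : List Int) : Prop :=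
  hgts ≠ [] ∧ nh ≤ (hgts.length : Int)
instance (nh : Int) (hgts : List Int) : Decidable (Pre_count_gates nh hgts) := by
  unfold Pre_count_gates; infer_instance

def pvWitness_count_gates : Int × List Int := (4, [2, 1, 3, 3])

def Spec_count_gates (nh : Int) (hgts : List Int) (out : Int) : Prop := out = count_gates_alt nh hgts
instance (nh : Int) (hgts : List Int) (out : Int) : Decidable (Spec_count_gates nh hgts out) := by unfold Spec_count_gates; infer_instance

-- ===== CLAIM (what is proved, stated in full; the proofs are below) =====
def Claim_equal_count_gates : Prop := ∀ (nh : Int) (hgts : List Int), Dom_count_gates nh hgts → Pre_count_gates nh hgts → Spec_count_gates nh hgts (count_gates nh hgts)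

-- ===== LEMMAS AND PROOFS =====

-- A's loop body, on the current height value.
def stepA (st : Int × Int) (h : Int) : Int × Int :=
  if h ≤ st.2 then st else (st.1 + 1, h)

-- B's loop body, on the current height value.
def stepB (run : List Int) (h : Int) : List Int :=
  run ++ [if run.isEmpty || decide (h > PySem.List.pyGetD run (-1) 0) then h
          else PySem.List.pyGetD run (-1) 0]

-- An index fold over range(nh) is the value fold over the first nh heights.
lemma fold_take {β : Type} (nh : Int) (hgts : List Int) (h0 : 0 ≤ nh)
    (hle : nh ≤ (hgts.length : Int)) (f : β → Int → β) (init : β) :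
    (PySem.List.pyRange 0 nh 1).foldl
      (fun acc i => f acc (PySem.List.pyGetD hgts i 0)) init
      = (hgts.take nh.toNat).foldl f init := by
  have htk : ((hgts.take nh.toNat).length : Int) = nh := by
    simp [List.length_take]; omega
  have hr : PySem.List.pyRange 0 nh 1
      = PySem.List.pyRange 0 ((hgts.take nh.toNat).length : Int) 1 := by rw [htk]
  rw [hr, ← PySem.List.foldl_pyRange_zero_pyGetD' (hgts.take nh.toNat) 0 f init]
  apply PySem.List.foldl_congr_mem
  intro acc i hi
  rcases PySem.List.mem_pyRange_one.1 hi with ⟨hi0, hi1⟩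
  rw [PySem.List.pyGetD_eq_getElem hgts 0 hi0 (by omega),
      PySem.List.pyGetD_eq_getElem (hgts.take nh.toNat) 0 hi0 (by omega),
      List.getElem_take]

-- The loop invariant: A's counter is the number of distinct values of B's table,
-- A's hgtp is the table's last (and largest) entry.
lemma inv_lemma (vs : List Int) :
    ∀ (c m : Int) (run : List Int) (hne : run ≠ []),
    run.getLast hne = m → (∀ x ∈ run, x ≤ m) →
    PySem.Set.len (PySem.Set.ofList run) = c →
    (vs.foldl stepA (c, m)).1 = PySem.Set.len (PySem.Set.ofList (vs.foldl stepB run)) := by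
  induction vs with
  | nil =>
    intro c m run hne hlast hub hc
    simpa using hc.symm
  | cons h t ih =>
    intro c m run hne hlast hub hc
    have hlastD : PySem.List.pyGetD run (-1) 0 = m := by
      rw [PySem.List.pyGetD_neg_one run 0 hne]; exact hlast
    have hEmp : run.isEmpty = false := by simp [hne]
    have hm : m ∈ run := hlast ▸ run.getLast_mem hne
    simp only [List.foldl_cons]
    by_cases hcmp : h ≤ m
    · have hsA : stepA (c, m) h = (c, m) := by simp [stepA, hcmp]
      have hsB : stepB run h = run ++ [m] := by
        simp [stepB, hEmp, hlastD, not_lt.2 hcmp]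
      rw [hsA, hsB]
      refine ih c m (run ++ [m]) (by simp) (by simp) ?_ ?_
      · intro x hx
        rcases List.mem_append.1 hx with hx | hx
        · exact hub x hx
        · simp at hx; omega
      · rw [PySem.Set.ofList_append_singleton, PySem.Set.add]
        simpa [PySem.Set.contains, (PySem.Set.mem_ofList run m).2 hm, PySem.Set.len]
          using hc
    · rw [not_le] at hcmp
      have hsA : stepA (c, m) h = (c + 1, h) := by simp [stepA, not_le.2 hcmp]
      have hsB : stepB run h = run ++ [h] := by
        simp [stepB, hEmp, hlastD, hcmp]
      rw [hsA, hsB]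
      refine ih (c + 1) h (run ++ [h]) (by simp) (by simp) ?_ ?_
      · intro x hx
        rcases List.mem_append.1 hx with hx | hx
        · exact le_of_lt (lt_of_le_of_lt (hub x hx) hcmp)
        · simp at hx; omega
      · have hnm : h ∉ run := fun hmem => absurd (hub h hmem) (not_le.2 hcmp)
        rw [PySem.Set.ofList_append_singleton, PySem.Set.add]
        have hmem : h ∉ PySem.Set.ofList run := by
          rw [PySem.Set.mem_ofList]; exact hnm
        simp [PySem.Set.contains, hmem, PySem.Set.len, ← hc]

-- ===== VERDICT (by name: the statement is the Claim_ definition above) =====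
theorem count_gates_spec : Claim_equal_count_gates := by
  intro nh hgts _ hpre
  rcases hpre with ⟨hne, hle⟩
  unfold Spec_count_gates count_gates count_gates_alt
  by_cases hpos : 0 < nh
  · have h0 : (0 : Int) ≤ nh := le_of_lt hpos
    show (List.foldl (fun st i => stepA st (PySem.List.pyGetD hgts i 0))
        (0, PySem.List.pyGetD hgts 0 0 - 1) (PySem.List.pyRange 0 nh 1)).1
      = PySem.Set.len (PySem.Set.ofList
          (List.foldl (fun run i => stepB run (PySem.List.pyGetD hgts i 0)) []
            (PySem.List.pyRange 0 nh 1)))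
    rw [fold_take nh hgts h0 hle stepA _, fold_take nh hgts h0 hle stepB _]
    rcases hgts with _ | ⟨w, t⟩
    · exact absurd rfl hne
    · have htk : (w :: t).take nh.toNat = w :: t.take (nh.toNat - 1) := by
        obtain ⟨k, hk⟩ := Nat.exists_eq_succ_of_ne_zero (show nh.toNat ≠ 0 by omega)
        rw [hk, List.take_succ_cons]
        simp
      rw [htk, PySem.List.pyGetD_zero_cons]
      simp only [List.foldl_cons]
      have hA1 : stepA (0, w - 1) w = (1, w) := by
        have : ¬ w ≤ w - 1 := by omega
        simp [stepA, this]
      have hB1 : stepB [] w = [w] := by simp [stepB]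
      rw [hA1, hB1]
      exact inv_lemma (t.take (nh.toNat - 1)) 1 w [w] (by simp) (by simp) (by simp)
        (by simp [PySem.Set.ofList_cons, PySem.Set.ofList_nil, PySem.Set.discard,
                  PySem.Set.len])
  · have : PySem.List.pyRange 0 nh 1 = [] := PySem.List.pyRange_one_eq_nil (by omega)
    simp [this]
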